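-- pv_equiv track=rewrite | github.com/Sankalp-Mittal/quantumReadyReport | generate_report.py | group_assets
-- ===== SOURCE A (Python) =====
-- from collections import OrderedDict
--
-- def root_domain(hostname):
--     """Return the eTLD+1 approximation (last two labels, strip port)."""
--     hostname = hostname.split(":")[0]
--     parts = hostname.split(".")
--     return ".".join(parts[-2:]) if len(parts) >= 2 else hostname
--
-- def group_assets(assets):
--     """
--     Returns OrderedDict { root_domain: [asset, ...] }
--     The root asset (if present) is always first in each list.
--     """
--     groups = OrderedDict()
--     for a in assets:
--         host = a.get("host", "")
--         rd = root_domain(host)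
--         groups.setdefault(rd, []).append(a)
--
--     # Within each group, sort so the exact root domain comes first
--     for rd, members in groups.items():
--         members.sort(key=lambda a: (0 if root_domain(a.get("host","")) == a.get("host","").split(":")[0] else 1,
--                                     a.get("host", "")))
--     return groups
-- ===== SOURCE B (Python) =====
-- from collections import OrderedDict
--
-- def group_assets(assets):
--     # Repeated partition: while assets remain ungrouped, take the first one's
--     # root domain, extract and sort that entire group, and continue with the rest.
--     def host(a):
--         return a.get("host", "")
--
--     def strip_port(h):
--         return h.split(":")[0]
--
--     def root(h):
--         base = strip_port(h)
--         p = base.split(".")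
--         return base if len(p) < 2 else p[-2] + "." + p[-1]
--
--     key = lambda a: (0 if root(host(a)) == strip_port(host(a)) else 1, host(a))
--     out = OrderedDict()
--     pending = list(assets)
--     while pending:
--         rd = root(host(pending[0]))
--         out[rd] = sorted((a for a in pending if root(host(a)) == rd), key=key)
--         pending = [a for a in pending if root(host(a)) != rd]
--     return out
-- ===== Notes on version B (the rewrite author's own statement) =====
-- stated objective: alternative
-- what changed: Replaces A's OrderedDict setdefault-accumulation followed by in-place per-group sorts with repeated partition extraction: take the first remaining asset's root domain, select and sort that entire group from the pending list, and loop on the leftover assets.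
import Mathlib
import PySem

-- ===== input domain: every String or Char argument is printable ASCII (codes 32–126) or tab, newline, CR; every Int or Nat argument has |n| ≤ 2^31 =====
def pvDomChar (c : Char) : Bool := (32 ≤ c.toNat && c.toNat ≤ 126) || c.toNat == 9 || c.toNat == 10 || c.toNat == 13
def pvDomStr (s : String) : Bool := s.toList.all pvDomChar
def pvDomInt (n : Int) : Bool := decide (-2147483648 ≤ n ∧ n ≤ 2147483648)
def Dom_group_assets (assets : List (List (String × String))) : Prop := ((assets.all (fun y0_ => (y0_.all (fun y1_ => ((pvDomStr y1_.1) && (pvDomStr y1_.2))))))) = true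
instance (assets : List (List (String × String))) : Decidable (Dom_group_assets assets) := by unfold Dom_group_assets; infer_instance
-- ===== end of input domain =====

-- B replaces A's dict setdefault-accumulation + per-group in-place sorts with
-- repeated partition extraction: take the first remaining asset's root domain,
-- pull out and sort that whole group, recurse on the rest (objective: alternative).

-- ===== PORT A =====
-- module helper root_domain, as A's module writes it (slice + join)
def rootDomainPV (hostname : String) : String :=
  let hostname := ((PySem.Str.split? hostname ":").getD []).headD ""   -- split(":")[0]; sep ≠ "" so split? = some, result nonempty
  let parts := (PySem.Str.split? hostname ".").getD []
  if parts.length ≥ 2 then PySem.Str.join "." (PySem.List.slice parts (some (-2)) none) else hostname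

-- a.get("host", "") on the asset dict (assoc list, first match)
def hostOfPV (a : List (String × String)) : String := (PySem.Dict.mk a).getD "host" ""

-- the members.sort key, split into its two tuple components for sorted2
def sortKey1PV (a : List (String × String)) : Int :=
  if rootDomainPV (hostOfPV a) = ((PySem.Str.split? (hostOfPV a) ":").getD []).headD "" then 0 else 1
def sortKey2PV (a : List (String × String)) : String := hostOfPV a

def group_assets (assets : List (List (String × String))) : List (String × List (List (String × String))) :=
  let groups := assets.foldl
    (fun d a => d.modify (rootDomainPV (hostOfPV a)) [] (· ++ [a]))   -- groups.setdefault(rd, []).append(a)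
    PySem.Dict.empty
  -- the second loop sorts each members list in place; the returned OrderedDict's items:
  (groups.items).map (fun p => (p.1, PySem.List.sorted2 p.2 sortKey1PV sortKey2PV))

-- ===== PORT B =====
def stripPortB (h : String) : String := ((PySem.Str.split? h ":").getD []).headD ""   -- h.split(":")[0]
def hostB (a : List (String × String)) : String := (PySem.Dict.mk a).getD "host" ""

-- B's root: last two labels spelled as p[-2] + "." + p[-1]
def rootB (h : String) : String :=
  let base := stripPortB h
  let p := (PySem.Str.split? base ".").getD []
  if p.length < 2 then base
  else ((PySem.List.pyGet? p (-2)).getD "") ++ "." ++ ((PySem.List.pyGet? p (-1)).getD "")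
  -- the .getD "" are never used: both indices are in range under the guard

def keyFlagB (a : List (String × String)) : Int :=
  if rootB (hostB a) = stripPortB (hostB a) then 0 else 1

def group_assets_alt : List (List (String × String)) → List (String × List (List (String × String)))
  | [] => []
  | a :: t =>
      let rd := rootB (hostB a)
      (rd, PySem.List.sorted2 ((a :: t).filter (fun x => rootB (hostB x) == rd)) keyFlagB hostB)
        :: group_assets_alt ((a :: t).filter (fun x => !(rootB (hostB x) == rd)))
  termination_by l => l.length
  decreasing_by
    simp only [List.filter_cons, beq_self_eq_true, Bool.not_true, if_neg, Bool.false_eq_true,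
      not_false_eq_true, List.length_cons]
    exact Nat.lt_succ_of_le (List.length_filter_le _ _)

-- ===== PRECONDITION & SPEC =====
def Spec_group_assets (assets : List (List (String × String))) (out : List (String × List (List (String × String)))) : Prop := out = group_assets_alt assets
instance (assets : List (List (String × String))) (out : List (String × List (List (String × String)))) : Decidable (Spec_group_assets assets out) := by unfold Spec_group_assets; infer_instance

-- ===== CLAIM (what is proved, stated in full; the proofs are below) =====
def Claim_equal_group_assets : Prop := ∀ (assets : List (List (String × String))), Dom_group_assets assets → Spec_group_assets assets (group_assets assets)

-- ===== LEMMAS AND PROOFS =====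

theorem pv_take_last_two {α : Type} (parts : List α) (h : parts.length ≥ 2) :
    ∃ l x y, parts = l ++ [x, y] := by
  rcases hrev : parts.reverse with _ | ⟨x, _ | ⟨y, r⟩⟩
  · simp_all
  · have := congrArg List.length hrev; simp at this; omega
  · exact ⟨r.reverse, y, x, by rw [← List.reverse_reverse parts, hrev]; simp⟩

theorem pv_join_pair (x y : String) : PySem.Str.join "." [x, y] = x ++ "." ++ y := by
  rw [String.congr_append (x ++ ".") y, String.toList_append]
  simp [PySem.Str.join, PySem.Chars.join_cons_cons, PySem.Chars.join_singleton]

theorem pv_last_two (parts : List String) (hl : parts.length ≥ 2) :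
    PySem.Str.join "." (PySem.List.slice parts (some (-2)) none)
      = ((PySem.List.pyGet? parts (-2)).getD "") ++ "." ++ ((PySem.List.pyGet? parts (-1)).getD "") := by
  obtain ⟨l, x, y, rfl⟩ := pv_take_last_two parts hl
  rw [PySem.List.slice_from_neg_ofNat _ 2 (by omega)]
  rw [PySem.List.pyGet?_neg_ofNat _ 2 (by omega) (by simp)]
  rw [PySem.List.pyGet?_neg_ofNat _ 1 (by omega) (by simp)]
  simp [List.drop_left', pv_join_pair]

-- the two modules' root_domain helpers agree
theorem pv_root_eq (h : String) : rootDomainPV h = rootB h := by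
  simp only [rootDomainPV, rootB, stripPortB]
  by_cases hl : ((PySem.Str.split? (((PySem.Str.split? h ":").getD []).headD "") ".").getD []).length ≥ 2
  · rw [if_pos hl, if_neg (by omega), pv_last_two _ hl]
  · rw [if_neg hl, if_pos (by omega)]

theorem pv_host_eq : hostOfPV = hostB := rfl

theorem pv_key1_eq : sortKey1PV = keyFlagB := by
  funext a
  simp only [sortKey1PV, keyFlagB, pv_root_eq, pv_host_eq, stripPortB]
  rfl

theorem pv_key2_eq : sortKey2PV = hostB := rfl

-- the grouping fold, rewritten over key/value pairs
theorem pv_fold_eq (assets : List (List (String × String))) :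
    assets.foldl (fun d a => d.modify (rootDomainPV (hostOfPV a)) [] (· ++ [a])) PySem.Dict.empty
      = (assets.map (fun a => (rootDomainPV (hostOfPV a), a))).foldl
          (fun d p => d.modify p.1 [] (· ++ [p.2])) PySem.Dict.empty := by
  rw [List.foldl_map]

theorem pv_keys (assets : List (List (String × String))) :
    (assets.foldl (fun d a => d.modify (rootDomainPV (hostOfPV a)) [] (· ++ [a])) PySem.Dict.empty).keys
      = PySem.List.dedup (assets.map (fun a => rootDomainPV (hostOfPV a))) := by
  rw [PySem.Dict.keys_foldl_modify_key assets (fun a => rootDomainPV (hostOfPV a)) [] (fun _ a v => v ++ [a])]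
  simp [PySem.Set.update_eq_append_filter, PySem.Dict.keys_empty, PySem.Set]

theorem pv_nodup_keys (assets : List (List (String × String))) :
    (assets.foldl (fun d a => d.modify (rootDomainPV (hostOfPV a)) [] (· ++ [a])) PySem.Dict.empty).keys.Nodup := by
  exact PySem.Dict.nodup_keys_foldl_modify_key assets (fun a => rootDomainPV (hostOfPV a)) [] (fun _ a v => v ++ [a])
    PySem.Dict.empty (by simp [PySem.Dict.keys_empty])

theorem pv_getD (assets : List (List (String × String))) (c : String) :
    (assets.foldl (fun d a => d.modify (rootDomainPV (hostOfPV a)) [] (· ++ [a])) PySem.Dict.empty).getD c []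
      = assets.filter (fun a => rootDomainPV (hostOfPV a) == c) := by
  rw [pv_fold_eq, PySem.Dict.getD_foldl_modify_append]
  simp only [PySem.Dict.getD_empty, List.nil_append]
  induction assets with
  | nil => rfl
  | cons a t ih =>
    by_cases h : rootDomainPV (hostOfPV a) == c <;>
      simp [h, ih]

-- A's result in closed form: first-appearance roots, each with its sorted selection
theorem pv_A_form (assets : List (List (String × String))) :
    group_assets assets
      = (PySem.List.dedup (assets.map (fun a => rootB (hostB a)))).map
          (fun rd => (rd, PySem.List.sorted2 (assets.filter (fun a => rootB (hostB a) == rd)) keyFlagB hostB)) := by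
  show (List.map (fun p => (p.1, PySem.List.sorted2 p.2 sortKey1PV sortKey2PV))
      (assets.foldl (fun d a => d.modify (rootDomainPV (hostOfPV a)) [] (· ++ [a])) PySem.Dict.empty).items)
    = _
  rw [PySem.Dict.items_eq_map_keys _ (pv_nodup_keys assets) []]
  rw [List.map_map, pv_keys]
  have hre : (fun a => rootDomainPV (hostOfPV a)) = (fun a => rootB (hostB a)) := by
    funext a; rw [pv_root_eq, pv_host_eq]
  rw [hre]
  apply List.map_congr_left
  intro r _
  simp only [Function.comp]
  rw [pv_getD, pv_key1_eq, pv_key2_eq]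
  simp only [pv_root_eq, pv_host_eq]

theorem pv_foldl_add_skip {α : Type} [BEq α] [LawfulBEq α] (ys : List α) (s : PySem.Set α) (x : α)
    (hx : x ∈ s) :
    List.foldl PySem.Set.add s ys = List.foldl PySem.Set.add s (ys.filter (fun y => !(y == x))) := by
  induction ys generalizing s with
  | nil => rfl
  | cons y t ih =>
    by_cases h : (y == x) = true
    · have hy : y = x := eq_of_beq h
      have hc : PySem.Set.add s y = s := by
        simp [PySem.Set.add, hy, hx]
      simp only [List.filter_cons, h, Bool.not_true, List.foldl_cons, hc]
      exact ih s hx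
    · simp only [List.filter_cons, h, Bool.not_false, List.foldl_cons]
      exact ih (PySem.Set.add s y) (by simp [PySem.Set.add]; split <;> simp [hx])

theorem pv_foldl_add_cons {α : Type} [BEq α] [LawfulBEq α] (ys : List α) (s : PySem.Set α) (x : α)
    (h : ∀ y ∈ ys, ¬((y == x) = true)) :
    List.foldl PySem.Set.add (x :: s) ys = x :: List.foldl PySem.Set.add s ys := by
  induction ys generalizing s with
  | nil => rfl
  | cons y t ih =>
    have hyx : (y == x) = false := by
      have := h y (by simp); simpa using this
    have hstep : PySem.Set.add (x :: s) y = x :: PySem.Set.add s y := by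
      have hc : PySem.Set.contains (x :: s) y = PySem.Set.contains s y := by
        simp [PySem.Set.contains, hyx]
      simp only [PySem.Set.add, hc]
      split <;> rfl
    simp only [List.foldl_cons, hstep]
    exact ih (PySem.Set.add s y) (fun z hz => h z (by simp [hz]))

-- first-occurrence dedup peels its head off
theorem pv_dedup_cons {α : Type} [BEq α] [LawfulBEq α] (x : α) (xs : List α) :
    PySem.List.dedup (x :: xs) = x :: PySem.List.dedup (xs.filter (fun y => !(y == x))) := by
  show List.foldl PySem.Set.add PySem.Set.empty (x :: xs) = _
  rw [List.foldl_cons]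
  have he : PySem.Set.add PySem.Set.empty x = [x] := by
    simp [PySem.Set.add, PySem.Set.empty]
  rw [he, pv_foldl_add_skip xs [x] x (by simp)]
  rw [show ([x] : PySem.Set α) = x :: ([] : List α) from rfl]
  rw [pv_foldl_add_cons _ _ _ (fun y hy => by simp at hy; simp [hy.2])]
  rfl

-- B's recursion computes the same closed form
set_option maxHeartbeats 1000000 in
theorem pv_B_form (assets : List (List (String × String))) :
    group_assets_alt assets
      = (PySem.List.dedup (assets.map (fun a => rootB (hostB a)))).map
          (fun rd => (rd, PySem.List.sorted2 (assets.filter (fun a => rootB (hostB a) == rd)) keyFlagB hostB)) := by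
  generalize hn : assets.length = n
  induction n using Nat.strong_induction_on generalizing assets with
  | _ n ih =>
  cases assets with
  | nil => simp [group_assets_alt, PySem.List.dedup, PySem.Set.ofList, PySem.Set.empty]
  | cons a t =>
    simp only [group_assets_alt]
    have hhead : (a :: t).filter (fun x => !(rootB (hostB x) == rootB (hostB a)))
        = t.filter (fun x => !(rootB (hostB x) == rootB (hostB a))) := by
      simp
    have hlen : (t.filter (fun x => !(rootB (hostB x) == rootB (hostB a)))).length < n := by
      have := List.length_filter_le (fun x => !(rootB (hostB x) == rootB (hostB a))) t
      simp at hn; omega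
    rw [hhead, ih _ hlen _ rfl]
    rw [List.map_cons, pv_dedup_cons, List.filter_map]
    rw [List.map_cons]
    simp only [List.cons.injEq]
    refine ⟨trivial, ?_⟩
    apply List.map_congr_left
    intro rd' hrd'
    have hne : rd' ≠ rootB (hostB a) := by
      rw [PySem.List.mem_dedup] at hrd'
      obtain ⟨x, hx, rfl⟩ := List.mem_map.mp hrd'
      have := (List.mem_filter.mp hx).2
      simpa using this
    have hfl : (t.filter (fun x => !(rootB (hostB x) == rootB (hostB a)))).filter
          (fun x => rootB (hostB x) == rd')
        = (a :: t).filter (fun x => rootB (hostB x) == rd') := by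
      rw [List.filter_filter]
      rw [List.filter_cons_of_neg (by simpa using fun h => hne h.symm)]
      apply List.filter_congr
      intro x hx
      by_cases h : rootB (hostB x) = rd'
      · simp [h]; exact hne
      · simp [h]
    rw [hfl]

-- ===== VERDICT (by name: the statement is the Claim_ definition above) =====
theorem group_assets_spec : Claim_equal_group_assets := by
  intro assets _
  show group_assets assets = group_assets_alt assets
  rw [pv_A_form, pv_B_form]
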